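-- pv_equiv track=rewrite | github.com/anhvt2/leetcode | 3477-fruits-into-basket-ii.py | numOfUnplacedFruits
-- ===== SOURCE A (Python) =====
-- from typing import List
--
-- def numOfUnplacedFruits(fruits: List[int], baskets: List[int]) -> int:
--     n, m = len(fruits), len(baskets)
--     used = [False] * m
--     unplaced = 0
--
--     # Try to place fruit i in basket j
--     for fruit in fruits:
--         placed = False
--         for j in range(m):
--             if not used[j] and baskets[j] >= fruit:
--                 used[j] = True
--                 placed = True
--                 break
--         if not placed:
--             unplaced += 1
--     return unplaced
-- ===== SOURCE B (Python) =====
-- from typing import List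
--
-- # Segment-tree (tournament tree) of remaining basket capacities:
-- # query/remove leftmost basket >= fruit in O(log m) instead of a linear scan.
-- # Tree nodes: ('L', value, used) leaves, ('N', maxOrNone, left, right) internal.
--
-- def _tmax(t):
--     if t[0] == 'L':
--         return None if t[2] else t[1]
--     return t[1]
--
-- def _omax(a, b):
--     if a is None:
--         return b
--     if b is None:
--         return a
--     return a if a >= b else b
--
-- def _build(bs):
--     if not bs:
--         return None
--     if len(bs) == 1:
--         return ('L', bs[0], False)
--     k = len(bs) // 2
--     l = _build(bs[:k])
--     r = _build(bs[k:])
--     return ('N', _omax(_tmax(l), _tmax(r)), l, r)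
--
-- def _ok(o, f):
--     return o is not None and o >= f
--
-- def _place(t, f):
--     # returns the tree with the leftmost available basket >= f marked used, or None
--     if t[0] == 'L':
--         if (not t[2]) and t[1] >= f:
--             return ('L', t[1], True)
--         return None
--     if not _ok(t[1], f):
--         return None
--     if _ok(_tmax(t[2]), f):
--         l2 = _place(t[2], f)
--         if l2 is not None:
--             return ('N', _omax(_tmax(l2), _tmax(t[3])), l2, t[3])
--         return None
--     r2 = _place(t[3], f)
--     if r2 is not None:
--         return ('N', _omax(_tmax(t[2]), _tmax(r2)), t[2], r2)
--     return None
--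
-- def numOfUnplacedFruits(fruits: List[int], baskets: List[int]) -> int:
--     t = _build(baskets)
--     if t is None:
--         return len(fruits)
--     unplaced = 0
--     for f in fruits:
--         t2 = _place(t, f)
--         if t2 is None:
--             unplaced += 1
--         else:
--             t = t2
--     return unplaced
-- ===== Notes on version B (the rewrite author's own statement) =====
-- stated objective: faster
-- what changed: Replaced A's linear scan over the used-flag array for every fruit by a tournament (segment) tree of remaining basket capacities, querying and removing the leftmost basket with capacity >= fruit in O(log m).
import Mathlib
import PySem

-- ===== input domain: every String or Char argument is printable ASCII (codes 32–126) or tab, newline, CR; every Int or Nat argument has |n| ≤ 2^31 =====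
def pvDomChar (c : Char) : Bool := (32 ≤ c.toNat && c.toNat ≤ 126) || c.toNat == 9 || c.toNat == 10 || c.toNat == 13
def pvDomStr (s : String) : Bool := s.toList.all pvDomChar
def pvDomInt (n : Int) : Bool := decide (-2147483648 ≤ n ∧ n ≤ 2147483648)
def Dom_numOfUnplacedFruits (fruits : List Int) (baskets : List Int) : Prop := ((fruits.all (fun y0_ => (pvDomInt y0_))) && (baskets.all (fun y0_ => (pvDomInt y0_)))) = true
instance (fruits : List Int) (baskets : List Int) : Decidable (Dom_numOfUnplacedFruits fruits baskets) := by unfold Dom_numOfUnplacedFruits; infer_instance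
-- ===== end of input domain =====

-- B replaces A's linear scan for the leftmost fitting basket by a tournament
-- (segment) tree of remaining capacities; return value proved equal everywhere.

-- ===== PORT A =====
-- A's inner `for j in range(m)` with the `used` array: scan baskets and flags
-- together, mark the first unused basket with capacity ≥ fruit.
def aPlace : List Int → List Bool → Int → Option (List Bool)
  | _, [], _ => none
  | [], _, _ => none
  | b :: bs, u :: us, f =>
      if u = false ∧ f ≤ b then some (true :: us)
      else (aPlace bs us f).map (u :: ·)

def numOfUnplacedFruits (fruits : List Int) (baskets : List Int) : Int :=
  (fruits.foldl
    (fun (st : List Bool × Int) fruit =>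
      match aPlace baskets st.1 fruit with
      | some u' => (u', st.2)
      | none => (st.1, st.2 + 1))
    (List.replicate baskets.length false, 0)).2

-- ===== PORT B =====
inductive PTree where
  | leaf : Int → Bool → PTree
  | node : Option Int → PTree → PTree → PTree
deriving DecidableEq, Repr

def tmax : PTree → Option Int
  | .leaf v u => if u then none else some v
  | .node m _ _ => m

def omax : Option Int → Option Int → Option Int
  | none, b => b
  | a, none => a
  | some x, some y => some (if y ≤ x then x else y)

def build (bs : List Int) : Option PTree :=
  match h : bs with
  | [] => none
  | [b] => some (.leaf b false)
  | b :: b' :: rest =>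
      let k := bs.length / 2
      match build (bs.take k), build (bs.drop k) with
      | some lt, some rt => some (.node (omax (tmax lt) (tmax rt)) lt rt)
      | _, _ => none
  termination_by bs.length
  decreasing_by
    · simp [h]; omega
    · simp [h]; omega

def ok : Option Int → Int → Bool
  | none, _ => false
  | some m, f => f ≤ m

def place : PTree → Int → Option PTree
  | .leaf v u, f => if u = false ∧ f ≤ v then some (.leaf v true) else none
  | .node m l r, f =>
      if ok m f = false then none
      else if ok (tmax l) f then
        match place l f with
        | some l' => some (.node (omax (tmax l') (tmax r)) l' r)
        | none => none
      else
        match place r f with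
        | some r' => some (.node (omax (tmax l) (tmax r')) l r')
        | none => none

def numOfUnplacedFruits_alt (fruits : List Int) (baskets : List Int) : Int :=
  match build baskets with
  | none => (fruits.length : Int)
  | some t0 =>
      (fruits.foldl
        (fun (st : PTree × Int) f =>
          match place st.1 f with
          | some t' => (t', st.2)
          | none => (st.1, st.2 + 1))
        (t0, 0)).2

-- ===== PRECONDITION & SPEC =====
def Spec_numOfUnplacedFruits (fruits : List Int) (baskets : List Int) (out : Int) : Prop := out = numOfUnplacedFruits_alt fruits baskets
instance (fruits : List Int) (baskets : List Int) (out : Int) : Decidable (Spec_numOfUnplacedFruits fruits baskets out) := by unfold Spec_numOfUnplacedFruits; infer_instance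

-- ===== CLAIM (what is proved, stated in full; the proofs are below) =====
def Claim_equal_numOfUnplacedFruits : Prop := ∀ (fruits : List Int) (baskets : List Int), Dom_numOfUnplacedFruits fruits baskets → Spec_numOfUnplacedFruits fruits baskets (numOfUnplacedFruits fruits baskets)

-- ===== LEMMAS AND PROOFS =====

def flatten : PTree → List (Int × Bool)
  | .leaf v u => [(v, u)]
  | .node _ l r => flatten l ++ flatten r

def maxU : List (Int × Bool) → Option Int
  | [] => none
  | (v, u) :: rest => omax (if u then none else some v) (maxU rest)

def TInv : PTree → Prop
  | .leaf _ _ => True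
  | .node m l r => m = omax (tmax l) (tmax r) ∧ TInv l ∧ TInv r

def mark : List (Int × Bool) → Int → Option (List (Int × Bool))
  | [], _ => none
  | (v, u) :: rest, f =>
      if u = false ∧ f ≤ v then some ((v, true) :: rest)
      else (mark rest f).map ((v, u) :: ·)

theorem omax_assoc (a b c : Option Int) : omax (omax a b) c = omax a (omax b c) := by
  cases a <;> cases b <;> cases c <;> simp [omax] <;> split_ifs <;> omega

theorem maxU_append (a b : List (Int × Bool)) :
    maxU (a ++ b) = omax (maxU a) (maxU b) := by
  induction a with
  | nil => simp [maxU, omax]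
  | cons x xs ih => obtain ⟨v, u⟩ := x; simp [maxU, ih, omax_assoc]


theorem tmax_eq_maxU (t : PTree) (h : TInv t) : tmax t = maxU (flatten t) := by
  induction t with
  | leaf v u => simp [tmax, flatten, maxU, omax]; split_ifs <;> simp
  | node m l r ihl ihr =>
      obtain ⟨hm, hl, hr⟩ := h
      rw [show tmax (.node m l r) = m from rfl, hm, flatten, maxU_append,
        ihl hl, ihr hr]


theorem mark_none_iff (l : List (Int × Bool)) (f : Int) :
    mark l f = none ↔ ok (maxU l) f = false := by
  induction l with
  | nil => simp [mark, maxU, ok]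
  | cons x xs ih =>
      obtain ⟨v, u⟩ := x
      by_cases hc : u = false ∧ f ≤ v
      · obtain ⟨rfl, hv⟩ := hc
        simp only [mark, maxU, Bool.false_eq_true, if_false, if_pos (⟨rfl, hv⟩ : False = False ∧ f ≤ v)]
        constructor
        · intro h; simp [hv] at h
        · intro h
          cases hmx : maxU xs
          · rw [hmx] at h; simp [omax, ok] at h; omega
          · rw [hmx] at h; simp [omax, ok] at h; split_ifs at h <;> omega
      · simp only [mark, if_neg hc, maxU]
        cases u with
        | true =>
            simp [omax, ih]
        | false =>
            simp only [Bool.false_eq_true, if_false]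
            have hv : v < f := by by_contra hh; exact hc ⟨rfl, by omega⟩
            cases hmx : maxU xs
            · simp [ih, hmx, omax, ok, hv]
            · simp [ih, hmx, omax, ok]
              split_ifs <;> omega


theorem mark_append (a b : List (Int × Bool)) (f : Int) :
    mark (a ++ b) f =
      match mark a f with
      | some a' => some (a' ++ b)
      | none => (mark b f).map (a ++ ·) := by
  induction a with
  | nil => cases h : mark b f <;> simp [mark, h]
  | cons x xs ih =>
      obtain ⟨v, u⟩ := x
      by_cases hc : u = false ∧ f ≤ v
      · simp [mark, hc]
      · simp only [List.cons_append, mark, if_neg hc, ih]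
        cases mark xs f <;> cases mark b f <;> simp


theorem mark_fst (l l' : List (Int × Bool)) (f : Int) (h : mark l f = some l') :
    l'.map Prod.fst = l.map Prod.fst := by
  induction l generalizing l' with
  | nil => simp [mark] at h
  | cons x xs ih =>
      obtain ⟨v, u⟩ := x
      by_cases hc : u = false ∧ f ≤ v
      · simp [mark, hc] at h; subst h; simp
      · simp [mark, hc] at h
        obtain ⟨ys, hys, rfl⟩ := h
        simp [ih ys hys]


theorem place_none (t : PTree) (f : Int) (hI : TInv t) (h : place t f = none) :
    mark (flatten t) f = none := by
  induction t with
  | leaf v u =>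
      simp only [place] at h
      by_cases hc : u = false ∧ f ≤ v
      · simp [hc] at h
      · simp [flatten, mark, hc]
  | node m l r ihl ihr =>
      obtain ⟨hm, hl, hr⟩ := hI
      have htl := tmax_eq_maxU l hl
      have htr := tmax_eq_maxU r hr
      simp only [place] at h
      by_cases hok : ok m f = false
      · rw [show flatten (PTree.node m l r) = flatten l ++ flatten r from rfl,
          mark_none_iff, maxU_append, ← htl, ← htr, ← hm]
        exact hok
      · rw [if_neg hok] at h
        by_cases hokl : ok (tmax l) f
        · rw [if_pos hokl] at h
          cases hpl : place l f with
          | some l' => rw [hpl] at h; simp at h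
          | none =>
              exact absurd ((mark_none_iff _ _).mp (ihl hl hpl))
                (by rw [← htl]; simp [hokl])
        · rw [if_neg hokl] at h
          cases hpr : place r f with
          | some r' => rw [hpr] at h; simp at h
          | none =>
              have h2 := ihr hr hpr
              have h1 : mark (flatten l) f = none :=
                (mark_none_iff _ _).mpr (by rw [← htl]; simpa using hokl)
              simp [show flatten (PTree.node m l r) = flatten l ++ flatten r from rfl,
                mark_append, h1, h2]


theorem place_some (t t' : PTree) (f : Int) (hI : TInv t) (h : place t f = some t') :
    TInv t' ∧ mark (flatten t) f = some (flatten t') := by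
  induction t generalizing t' with
  | leaf v u =>
      simp only [place] at h
      by_cases hc : u = false ∧ f ≤ v
      · rw [if_pos hc] at h
        obtain rfl : PTree.leaf v true = t' := by simpa using h
        exact ⟨trivial, by simp [flatten, mark, hc]⟩
      · rw [if_neg hc] at h; simp at h
  | node m l r ihl ihr =>
      obtain ⟨hm, hl, hr⟩ := hI
      have htl := tmax_eq_maxU l hl
      have htr := tmax_eq_maxU r hr
      simp only [place] at h
      by_cases hok : ok m f = false
      · rw [if_pos hok] at h; simp at h
      · rw [if_neg hok] at h
        by_cases hokl : ok (tmax l) f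
        · rw [if_pos hokl] at h
          cases hpl : place l f with
          | none => rw [hpl] at h; simp at h
          | some l' =>
              rw [hpl] at h
              obtain rfl : PTree.node (omax (tmax l') (tmax r)) l' r = t' := by simpa using h
              obtain ⟨hIl', hml'⟩ := ihl l' hl hpl
              refine ⟨⟨rfl, hIl', hr⟩, ?_⟩
              simp [show flatten (PTree.node m l r) = flatten l ++ flatten r from rfl,
                mark_append, hml', flatten]
        · rw [if_neg hokl] at h
          cases hpr : place r f with
          | none => rw [hpr] at h; simp at h
          | some r' =>
              rw [hpr] at h
              obtain rfl : PTree.node (omax (tmax l) (tmax r')) l r' = t' := by simpa using h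
              obtain ⟨hIr', hmr'⟩ := ihr r' hr hpr
              have h1 : mark (flatten l) f = none :=
                (mark_none_iff _ _).mpr (by rw [← htl]; simpa using hokl)
              refine ⟨⟨rfl, hl, hIr'⟩, ?_⟩
              simp [show flatten (PTree.node m l r) = flatten l ++ flatten r from rfl,
                mark_append, h1, hmr', flatten]


theorem build_some (bs : List Int) (hne : bs ≠ []) :
    ∃ t, build bs = some t ∧ flatten t = bs.map (·, false) ∧ TInv t := by
  induction hn : bs.length using Nat.strong_induction_on generalizing bs with
  | _ n ih =>
    match bs with
    | [] => exact absurd rfl hne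
    | [b] => exact ⟨.leaf b false, by rw [build], by simp [flatten], trivial⟩
    | b :: b' :: rest =>
      subst hn
      set l := b :: b' :: rest with hL
      set k := l.length / 2 with hk
      have hk1 : 1 ≤ k := by simp [hk, hL]; omega
      have hkl : k < l.length := by simp [hk, hL]; omega
      have htne : l.take k ≠ [] := by
        intro hcon; have := congrArg List.length hcon; simp at this; omega
      have hdne : l.drop k ≠ [] := by
        intro hcon; have := congrArg List.length hcon; simp at this; omega
      obtain ⟨lt, hblt, hflt, hIlt⟩ :=
        ih (l.take k).length (by simp; omega) (l.take k) htne rfl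
      obtain ⟨rt, hbrt, hfrt, hIrt⟩ :=
        ih (l.drop k).length (by simp; omega) (l.drop k) hdne rfl
      refine ⟨.node (omax (tmax lt) (tmax rt)) lt rt, ?_, ?_, rfl, hIlt, hIrt⟩
      · rw [build]; rw [← hk, hblt, hbrt]
      · rw [show flatten (PTree.node (omax (tmax lt) (tmax rt)) lt rt)
            = flatten lt ++ flatten rt from rfl, hflt, hfrt,
          ← List.map_append, List.take_append_drop]


theorem aPlace_eq_mark (bs : List Int) (us : List Bool) (f : Int)
    (h : bs.length = us.length) :
    aPlace bs us f = (mark (bs.zip us) f).map (List.map Prod.snd) := by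
  induction bs generalizing us with
  | nil => cases us <;> simp_all [aPlace, mark]
  | cons b bs ih =>
      cases us with
      | nil => simp at h
      | cons u us =>
          simp only [List.length_cons, Nat.add_right_cancel_iff] at h
          by_cases hc : u = false ∧ f ≤ b
          · simp [aPlace, mark, hc]
            exact (List.map_snd_zip (le_of_eq h.symm)).symm
          · simp only [List.zip_cons_cons, aPlace, mark, if_neg hc, ih us h]
            cases mark (bs.zip us) f <;> simp


theorem zip_fst_snd (l : List (Int × Bool)) :
    (l.map Prod.fst).zip (l.map Prod.snd) = l := by
  induction l with
  | nil => rfl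
  | cons x xs ih => obtain ⟨v, u⟩ := x; simp [ih]


theorem foldl_empty_baskets (fs : List Int) (c : Int) :
    (fs.foldl
      (fun (st : List Bool × Int) fruit =>
        match aPlace [] st.1 fruit with
        | some u' => (u', st.2)
        | none => (st.1, st.2 + 1)) ([], c)).2 = c + fs.length := by
  induction fs generalizing c with
  | nil => simp
  | cons f fs ih => simp [aPlace, ih]; omega

theorem zip_replicate_false (bs : List Int) :
    bs.zip (List.replicate bs.length false) = bs.map (·, false) := by
  induction bs with
  | nil => rfl
  | cons b bs ih => simp [List.replicate, ih]

theorem loop_eq (baskets fs : List Int) :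
    ∀ (t : PTree) (us : List Bool) (c : Int),
      TInv t → flatten t = baskets.zip us → us.length = baskets.length →
      (fs.foldl
        (fun (st : List Bool × Int) fruit =>
          match aPlace baskets st.1 fruit with
          | some u' => (u', st.2)
          | none => (st.1, st.2 + 1)) (us, c)).2
      = (fs.foldl
        (fun (st : PTree × Int) f =>
          match place st.1 f with
          | some t' => (t', st.2)
          | none => (st.1, st.2 + 1)) (t, c)).2 := by
  induction fs with
  | nil => intro t us c _ _ _; rfl
  | cons f fs ih =>
      intro t us c hI hfl hlen
      have hap : aPlace baskets us f = (mark (baskets.zip us) f).map (List.map Prod.snd) :=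
        aPlace_eq_mark baskets us f hlen.symm
      cases hp : place t f with
      | none =>
          have hm := place_none t f hI hp
          rw [hfl] at hm
          simp only [List.foldl_cons, hp, hap, hm, Option.map_none]
          exact ih t us (c + 1) hI hfl hlen
      | some t' =>
          obtain ⟨hI', hm⟩ := place_some t t' f hI hp
          rw [hfl] at hm
          have hfst : (flatten t').map Prod.fst = baskets := by
            rw [mark_fst _ _ f hm, List.map_fst_zip (le_of_eq hlen.symm)]
          have hfl' : flatten t' = baskets.zip ((flatten t').map Prod.snd) := by
            rw [← hfst, zip_fst_snd]
          have hlen' : ((flatten t').map Prod.snd).length = baskets.length := by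
            have := congrArg List.length hfst; simpa using this
          simp only [List.foldl_cons, hp, hap, hm, Option.map_some]
          exact ih t' ((flatten t').map Prod.snd) c hI' hfl' hlen'

-- ===== VERDICT (by name: the statement is the Claim_ definition above) =====
theorem numOfUnplacedFruits_spec : Claim_equal_numOfUnplacedFruits := by
  intro fruits baskets _
  unfold Spec_numOfUnplacedFruits numOfUnplacedFruits numOfUnplacedFruits_alt
  by_cases hb : baskets = []
  · subst hb
    rw [show build [] = none from (by rw [build])]
    simp only [List.length_nil, List.replicate]
    rw [foldl_empty_baskets]
    simp
  · obtain ⟨t0, hbuild, hfl, hI⟩ := build_some baskets hb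
    rw [hbuild]
    exact loop_eq baskets fruits t0 (List.replicate baskets.length false) 0 hI
      (by rw [hfl, zip_replicate_false]) (by simp)
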